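-- pv_equiv track=rewrite | github.com/rvnsource/IK | Recursion/permuteNintegers.py | helper
-- ===== SOURCE A (Python) =====
-- def helper(arr,n):
--     if n == 1:
--         tmp = []
--         arr_size = len(arr)
--         for i in range(1, arr_size + 1, 1):
--             tmp.append(i)
--         return tmp
--
--     else:
--         prev = helper(arr, n-1)
--         result = []
--
--         for s in prev:
--              for i in range(1, len(arr)+1, 1):
--                 result.append(i)
--         return result
-- ===== SOURCE B (Python) =====
-- def helper(arr, n):
--     result = list(range(1, len(arr) + 1))
--     for _ in range(n - 1):
--         result = result * len(arr)
--     return result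
-- ===== Notes on version B (the rewrite author's own statement) =====
-- stated objective: alternative
-- what changed: Replaces the n-deep recursion with per-element appends by computing the block [1..len(arr)] once and tiling it with list multiplication in a flat n-1 iteration loop.
import Mathlib
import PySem

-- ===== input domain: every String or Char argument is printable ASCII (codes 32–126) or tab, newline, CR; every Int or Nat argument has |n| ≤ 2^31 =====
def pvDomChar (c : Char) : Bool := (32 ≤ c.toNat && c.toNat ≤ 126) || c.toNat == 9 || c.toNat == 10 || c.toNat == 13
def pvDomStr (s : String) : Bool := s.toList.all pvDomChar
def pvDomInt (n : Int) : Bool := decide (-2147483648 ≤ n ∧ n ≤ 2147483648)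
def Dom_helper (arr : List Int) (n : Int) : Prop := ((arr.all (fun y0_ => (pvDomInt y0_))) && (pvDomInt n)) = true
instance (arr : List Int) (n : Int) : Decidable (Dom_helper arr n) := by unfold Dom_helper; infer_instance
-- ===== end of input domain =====

-- B replaces A's n-deep recursion with per-element appends by computing the block
-- [1..len(arr)] once and tiling it with list multiplication in a flat n-1 iteration loop.

-- ===== PORT A =====
-- A recurses on n; for n < 1 the Python recursion never terminates (RecursionError),
-- excluded by Pre_helper; the `n ≤ 1` guard only makes the same computation total.
def helper (arr : List Int) (n : Int) : List Int :=
  if n ≤ 1 then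
    -- tmp = []; for i in range(1, len(arr)+1): tmp.append(i)
    PySem.List.pyRange 1 ((arr.length : Int) + 1) 1
  else
    -- prev = helper(arr, n-1); for s in prev: for i in range(1, len(arr)+1): result.append(i)
    (helper arr (n - 1)).foldl
      (fun result _ => result ++ PySem.List.pyRange 1 ((arr.length : Int) + 1) 1) []
termination_by n.toNat
decreasing_by omega

-- ===== PORT B =====
-- result = list(range(1, len(arr)+1)); for _ in range(n-1): result = result * len(arr)
def helper_alt (arr : List Int) (n : Int) : List Int :=
  (PySem.List.pyRange 0 (n - 1) 1).foldl
    (fun result _ => PySem.List.pyRepeat result ((arr.length : Int)))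
    (PySem.List.pyRange 1 ((arr.length : Int) + 1) 1)

-- ===== PRECONDITION & SPEC =====
-- Pre_ excludes n < 1, where Python A recurses forever (RecursionError).
def Pre_helper (arr : List Int) (n : Int) : Prop := 1 ≤ n
instance (arr : List Int) (n : Int) : Decidable (Pre_helper arr n) := by unfold Pre_helper; infer_instance
def pvWitness_helper : List Int × Int := ([1, 2], 2)

def Spec_helper (arr : List Int) (n : Int) (out : List Int) : Prop := out = helper_alt arr n
instance (arr : List Int) (n : Int) (out : List Int) : Decidable (Spec_helper arr n out) := by unfold Spec_helper; infer_instance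

-- ===== CLAIM (what is proved, stated in full; the proofs are below) =====
def Claim_equal_helper : Prop := ∀ (arr : List Int) (n : Int), Dom_helper arr n → Pre_helper arr n → Spec_helper arr n (helper arr n)

-- ===== LEMMAS AND PROOFS =====

-- tiling a tile: concatenating a copies of (b copies of x) is a*b copies of x
theorem flatten_replicate_mul {α : Type} (a b : Nat) (x : List α) :
    (List.replicate a ((List.replicate b x).flatten)).flatten
      = (List.replicate (a * b) x).flatten := by
  induction a with
  | zero => simp
  | succ k ih =>
      simp only [List.replicate_succ, List.flatten_cons, ih, Nat.succ_mul, Nat.add_comm,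
        List.replicate_add, List.flatten_append]

-- closed form of A's recursion
theorem helper_closed (arr : List Int) (m : Nat) :
    helper arr ((m : Int) + 1) =
      (List.replicate (arr.length ^ m)
        (PySem.List.pyRange 1 ((arr.length : Int) + 1) 1)).flatten := by
  induction m with
  | zero =>
      rw [helper]
      simp
  | succ k ih =>
      rw [helper]
      have hgt : ¬ ((k + 1 : Nat) : Int) + 1 ≤ 1 := by push_cast; omega
      simp only [hgt, if_false]
      have harg : ((k + 1 : Nat) : Int) + 1 - 1 = (k : Int) + 1 := by push_cast; ring
      rw [harg, ih, PySem.List.foldl_append_eq_flatMap]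
      have hflat : ∀ (l : List Int) (b : List Int),
          l.flatMap (fun _ => b) = (List.replicate l.length b).flatten := by
        intro l b
        induction l with
        | nil => rfl
        | cons x t iht => simp [List.flatMap_cons, List.replicate_succ, iht]
      rw [hflat, List.nil_append]
      simp only [List.length_flatten, List.map_replicate, List.sum_replicate,
        PySem.List.length_pyRange_one]
      have h1 : ((arr.length : Int) + 1 - 1).toNat = arr.length := by omega
      rw [h1, smul_eq_mul, pow_succ]

-- closed form of B's tiling loop
theorem helper_alt_closed (arr : List Int) (m : Nat) :
    (PySem.List.pyRange 0 (m : Int) 1).foldl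
        (fun result _ => PySem.List.pyRepeat result ((arr.length : Int)))
        (PySem.List.pyRange 1 ((arr.length : Int) + 1) 1)
      = (List.replicate (arr.length ^ m)
          (PySem.List.pyRange 1 ((arr.length : Int) + 1) 1)).flatten := by
  induction m with
  | zero =>
      simp [PySem.List.pyRange]
  | succ k ih =>
      have hcast : ((k + 1 : Nat) : Int) = (k : Int) + 1 := by push_cast; ring
      have hr := PySem.List.pyRange_one_succ_right (a := 0) (b := (k : Int)) (Int.natCast_nonneg k)
      rw [hcast, hr, List.foldl_append, ih]
      simp only [List.foldl_cons, List.foldl_nil, PySem.List.pyRepeat, Int.toNat_natCast]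
      rw [flatten_replicate_mul, pow_succ, Nat.mul_comm]

-- ===== VERDICT (by name: the statement is the Claim_ definition above) =====
theorem helper_spec : Claim_equal_helper := by
  intro arr n _ hpre
  unfold Spec_helper helper_alt
  obtain ⟨m, hm⟩ : ∃ m : Nat, n = (m : Int) + 1 :=
    ⟨(n - 1).toNat, by unfold Pre_helper at hpre; omega⟩
  subst hm
  simp only [add_sub_cancel_right]
  rw [helper_closed, helper_alt_closed]
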